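-- pv_equiv track=rewrite | github.com/Friularo2014/dev | project_euler/61/e61_improved.py | checkSolution2
-- ===== SOURCE A (Python) =====
-- def checkIfAllDifferent(idxSet):
--     s = set(idxSet)
--     return len(s) == len(idxSet)
--
-- def checkSolution2(a, solution, idxSet):
--     level = len(idxSet)
--     if level == len(solution):
--         return checkIfAllDifferent(idxSet)
--
--     found = False
--     for setIdx in a[solution[level]]:
--         idxSet.append(setIdx)
--         found = checkSolution2(a, solution, idxSet)
--         if found:
--             break
--         else:
--             idxSet.pop()
--     return found
-- ===== SOURCE B (Python) =====
-- def checkSolution2(a, solution, idxSet):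
--     # Return-value equivalent re-implementation (does not mutate idxSet, unlike A):
--     # prunes a branch as soon as the chosen index repeats, instead of checking
--     # distinctness only at complete leaves.
--     if len(set(idxSet)) != len(idxSet):
--         return False
--
--     def extend(used, level):
--         if level == len(solution):
--             return True
--         for x in a[solution[level]]:
--             if x not in used and extend(used | {x}, level + 1):
--                 return True
--         return False
--
--     return extend(set(idxSet), len(idxSet))
-- ===== Notes on version B (the rewrite author's own statement) =====
-- stated objective: alternative
-- what changed: B prunes a branch as soon as the chosen set index is already in the running used-set (incremental uniqueness check), instead of A's testing all-different only at complete leaves; B also does not mutate idxSet.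
-- outside the precondition, e.g. on checkSolution2([[]], [0, 5], []): A returns False, B returns False; on checkSolution2([[3, 4], [], [-2, -1]], [2, 1, 3], [1]): A returns False, B returns False
import Mathlib
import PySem

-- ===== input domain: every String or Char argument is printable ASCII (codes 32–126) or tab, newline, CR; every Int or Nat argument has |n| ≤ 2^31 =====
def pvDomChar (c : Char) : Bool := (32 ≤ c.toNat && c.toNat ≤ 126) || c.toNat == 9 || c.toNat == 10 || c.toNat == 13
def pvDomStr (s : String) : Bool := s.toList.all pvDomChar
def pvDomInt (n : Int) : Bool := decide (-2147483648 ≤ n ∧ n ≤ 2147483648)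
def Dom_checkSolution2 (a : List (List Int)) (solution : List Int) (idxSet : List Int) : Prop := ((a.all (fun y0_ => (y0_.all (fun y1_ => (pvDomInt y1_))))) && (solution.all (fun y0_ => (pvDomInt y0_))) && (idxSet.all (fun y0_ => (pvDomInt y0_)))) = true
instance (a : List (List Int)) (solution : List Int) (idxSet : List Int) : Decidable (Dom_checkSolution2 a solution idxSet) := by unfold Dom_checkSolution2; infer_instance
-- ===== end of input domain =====

-- B prunes a branch as soon as a chosen index repeats (incremental uniqueness check) instead of
-- checking distinctness only at complete leaves (an alternative search strategy, same result);
-- equivalence is about the RETURN value only (Python A mutates idxSet in place, B does not).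

-- ===== PORT A =====
def checkIfAllDifferent (idxSet : List Int) : Bool :=
  (PySem.Set.ofList idxSet).length == idxSet.length

def checkSolution2 (a : List (List Int)) (solution : List Int) (idxSet : List Int) : Bool :=
  let level := idxSet.length
  if level = solution.length then checkIfAllDifferent idxSet
  else
    match h1 : PySem.List.pyGet? solution (level : Int) with
    | none => false   -- Python raises IndexError here; excluded by Pre_
    | some s =>
      match PySem.List.pyGet? a s with
      | none => false -- Python raises IndexError here; excluded by Pre_
      | some opts =>
        opts.any (fun setIdx => checkSolution2 a solution (idxSet ++ [setIdx]))
termination_by solution.length - idxSet.length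
decreasing_by
  have hlt : idxSet.length < solution.length := by
    rw [PySem.List.pyGet?_natCast] at h1
    have := List.getElem?_eq_some_iff.mp h1
    exact this.1
  simp only [List.length_append, List.length_cons, List.length_nil]
  omega

-- ===== PORT B =====
def extendB (a : List (List Int)) (solution : List Int) (used : PySem.Set Int) (level : Nat) : Bool :=
  if level = solution.length then true
  else
    match h1 : PySem.List.pyGet? solution (level : Int) with
    | none => false   -- Python raises IndexError here; excluded by Pre_
    | some s =>
      match PySem.List.pyGet? a s with
      | none => false -- Python raises IndexError here; excluded by Pre_
      | some opts =>
        opts.any (fun x =>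
          !(PySem.Set.contains used x) && extendB a solution (PySem.Set.add used x) (level + 1))
termination_by solution.length - level
decreasing_by
  have hlt : level < solution.length := by
    rw [PySem.List.pyGet?_natCast] at h1
    have := List.getElem?_eq_some_iff.mp h1
    exact this.1
  omega

def checkSolution2_alt (a : List (List Int)) (solution : List Int) (idxSet : List Int) : Bool :=
  if (PySem.Set.ofList idxSet).length ≠ idxSet.length then false
  else extendB a solution (PySem.Set.ofList idxSet) idxSet.length

-- ===== PRECONDITION & SPEC =====
-- Pre_ excludes the inputs on which A can hit an IndexError: it requires len(idxSet) ≤ len(solution)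
-- and every remaining solution[level] to be a valid (possibly negative) index into a; this is slightly
-- narrower than "A returns" since a branch cut short (empty option list or early success) can stop A
-- before it reaches an invalid index.
def Pre_checkSolution2 (a : List (List Int)) (solution : List Int) (idxSet : List Int) : Prop :=
  idxSet.length ≤ solution.length ∧
    ∀ i ∈ solution.drop idxSet.length, PySem.Raise.InRange a.length i
instance (a : List (List Int)) (solution : List Int) (idxSet : List Int) : Decidable (Pre_checkSolution2 a solution idxSet) := by unfold Pre_checkSolution2; infer_instance

def pvWitness_checkSolution2 : List (List Int) × List Int × List Int :=
  ([[0, 1], [1, 2]], [0, 1], [])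

def Spec_checkSolution2 (a : List (List Int)) (solution : List Int) (idxSet : List Int) (out : Bool) : Prop := out = checkSolution2_alt a solution idxSet
instance (a : List (List Int)) (solution : List Int) (idxSet : List Int) (out : Bool) : Decidable (Spec_checkSolution2 a solution idxSet out) := by unfold Spec_checkSolution2; infer_instance

-- ===== CLAIM (what is proved, stated in full; the proofs are below) =====
def Claim_equal_checkSolution2 : Prop := ∀ (a : List (List Int)) (solution : List Int) (idxSet : List Int), Dom_checkSolution2 a solution idxSet → Pre_checkSolution2 a solution idxSet → Spec_checkSolution2 a solution idxSet (checkSolution2 a solution idxSet)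

-- ===== LEMMAS AND PROOFS =====

lemma alldiff_append_singleton (l : List Int) (x : Int) :
    checkIfAllDifferent (l ++ [x]) =
      (checkIfAllDifferent l && !(PySem.Set.contains (PySem.Set.ofList l) x)) := by
  simp only [checkIfAllDifferent, PySem.Set.contains_eq_listContains,
    PySem.Set.ofList_append_singleton, PySem.Set.add_eq_ite, PySem.Set.mem_ofList]
  have hle := PySem.Set.length_ofList_le (xs := l)
  by_cases hx : x ∈ l
  · have h : (PySem.Set.ofList l).length ≠ l.length + 1 := by omega
    simp [hx, h]
  · by_cases h2 : (PySem.Set.ofList l).length = l.length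
    · have h : (PySem.Set.ofList l ++ [x]).length = (l ++ [x]).length := by simp [h2]
      simp [hx]
    · have h : (PySem.Set.ofList l ++ [x]).length ≠ (l ++ [x]).length := by
        simp only [List.length_append, List.length_cons, List.length_nil]; omega
      simp [hx]

lemma any_congr' {α : Type} {l : List α} {f g : α → Bool} (h : ∀ x ∈ l, f x = g x) :
    l.any f = l.any g := by
  induction l with
  | nil => rfl
  | cons a t ih =>
    simp only [List.any_cons]
    rw [h a List.mem_cons_self, ih (fun x hx => h x (List.mem_cons_of_mem _ hx))]

lemma any_const_and {α : Type} (l : List α) (c : Bool) (f : α → Bool) :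
    l.any (fun x => c && f x) = (c && l.any f) := by
  cases c <;> simp

lemma checkA_unfold (a : List (List Int)) (solution : List Int) (idxSet : List Int)
    (s : Int) (opts : List Int) (hne : idxSet.length ≠ solution.length)
    (hget : PySem.List.pyGet? solution (idxSet.length : Int) = some s)
    (hopts : PySem.List.pyGet? a s = some opts) :
    checkSolution2 a solution idxSet =
      opts.any (fun x => checkSolution2 a solution (idxSet ++ [x])) := by
  rw [checkSolution2]
  simp only [if_neg hne]
  split
  · next heq => rw [hget] at heq; cases heq
  · next s' heq =>
      rw [hget] at heq
      cases heq
      split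
      · next heq2 => rw [hopts] at heq2; cases heq2
      · next opts' heq2 => rw [hopts] at heq2; cases heq2; rfl

lemma checkB_unfold (a : List (List Int)) (solution : List Int) (used : PySem.Set Int)
    (level : Nat) (s : Int) (opts : List Int) (hne : level ≠ solution.length)
    (hget : PySem.List.pyGet? solution (level : Int) = some s)
    (hopts : PySem.List.pyGet? a s = some opts) :
    extendB a solution used level =
      opts.any (fun x =>
        !(PySem.Set.contains used x) && extendB a solution (PySem.Set.add used x) (level + 1)) := by
  rw [extendB]
  simp only [if_neg hne]
  split
  · next heq => rw [hget] at heq; cases heq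
  · next s' heq =>
      rw [hget] at heq
      cases heq
      split
      · next heq2 => rw [hopts] at heq2; cases heq2
      · next opts' heq2 => rw [hopts] at heq2; cases heq2; rfl

lemma main_lemma (a : List (List Int)) (solution : List Int) :
    ∀ n idxSet, solution.length - idxSet.length = n →
      Pre_checkSolution2 a solution idxSet →
      checkSolution2 a solution idxSet =
        (checkIfAllDifferent idxSet &&
          extendB a solution (PySem.Set.ofList idxSet) idxSet.length) := by
  intro n
  induction n with
  | zero =>
    intro idxSet hn ⟨hle, _⟩
    have heq : idxSet.length = solution.length := by omega
    rw [checkSolution2, extendB]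
    simp [heq]
  | succ m ih =>
    intro idxSet hn ⟨hle, hrange⟩
    have hlt : idxSet.length < solution.length := by omega
    have hget : PySem.List.pyGet? solution (idxSet.length : Int) =
        some solution[idxSet.length] :=
      PySem.List.pyGet?_ofNat solution idxSet.length hlt
    have hmem : solution[idxSet.length] ∈ solution.drop idxSet.length := by
      rw [List.mem_iff_getElem]
      exact ⟨0, by rw [List.length_drop]; omega, by simp⟩
    have hin : PySem.Raise.InRange a.length solution[idxSet.length] := hrange _ hmem
    obtain ⟨opts, hopts⟩ : ∃ opts, PySem.List.pyGet? a solution[idxSet.length] = some opts := by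
      rcases h : PySem.List.pyGet? a solution[idxSet.length] with _ | opts
      · exact absurd hin ((PySem.List.pyGet?_eq_none_iff _ _).mp h)
      · exact ⟨opts, rfl⟩
    rw [checkA_unfold a solution idxSet _ opts (by omega) hget hopts,
        checkB_unfold a solution (PySem.Set.ofList idxSet) idxSet.length _ opts (by omega) hget hopts]
    have hstep : ∀ x ∈ opts,
        checkSolution2 a solution (idxSet ++ [x]) =
          (checkIfAllDifferent idxSet &&
            (!(PySem.Set.contains (PySem.Set.ofList idxSet) x) &&
              extendB a solution (PySem.Set.add (PySem.Set.ofList idxSet) x)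
                (idxSet.length + 1))) := by
      intro x _
      have hpre' : Pre_checkSolution2 a solution (idxSet ++ [x]) := by
        refine ⟨by simp only [List.length_append, List.length_cons, List.length_nil]; omega, ?_⟩
        intro i hi
        apply hrange
        have hdd : List.drop (idxSet ++ [x]).length solution =
            List.drop 1 (List.drop idxSet.length solution) := by
          rw [List.drop_drop]
          congr 1
          simp only [List.length_append, List.length_cons, List.length_nil]
        rw [hdd] at hi
        exact List.mem_of_mem_drop hi
      have hih := ih (idxSet ++ [x]) (by simp only [List.length_append, List.length_cons, List.length_nil]; omega) hpre'
      rw [hih, alldiff_append_singleton, PySem.Set.ofList_append_singleton]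
      simp [Bool.and_assoc, List.length_append]
    rw [any_congr' hstep, any_const_and]

-- ===== VERDICT (by name: the statement is the Claim_ definition above) =====
theorem checkSolution2_spec : Claim_equal_checkSolution2 := by
  intro a solution idxSet _ hpre
  unfold Spec_checkSolution2 checkSolution2_alt
  rw [main_lemma a solution (solution.length - idxSet.length) idxSet rfl hpre]
  by_cases h : (PySem.Set.ofList idxSet).length = idxSet.length
  · simp [checkIfAllDifferent, h]
  · simp [checkIfAllDifferent, h]
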